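-- pv_equiv track=rewrite | github.com/hassan97mahmoud/Explore_SQL_DB_by_NL | App3b.py | format_dynamic_schema_logic
-- ===== SOURCE A (Python) =====
-- def format_dynamic_schema_logic(relevant_table_names: list, full_db_schema: str) -> str:
--     # This logic can be simplified or improved, but we'll keep it for now.
--     # The main db.get_table_info() is more important.
--     if not relevant_table_names: return "No specific table schema provided."
--     schema_lines = full_db_schema.strip().split('\n')
--     dynamic_schema_parts = []
--     lower_relevant_tables = [t.lower() for t in relevant_table_names]
--     current_table_lines = []
--     is_matching_table = False
--     for line in schema_lines:
--         stripped_line = line.strip()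
--         if "CREATE TABLE" in stripped_line.upper():
--             if is_matching_table and current_table_lines:
--                 dynamic_schema_parts.extend(current_table_lines)
--             current_table_lines = []
--             # Extract table name robustly
--             table_name_in_line = stripped_line.split("(", 1)[0].replace("CREATE TABLE", "").strip(' `"').lower()
--             if table_name_in_line in lower_relevant_tables:
--                 is_matching_table = True
--                 current_table_lines.append(stripped_line)
--             else:
--                 is_matching_table = False
--         elif is_matching_table:
--             current_table_lines.append(stripped_line)
--     if is_matching_table and current_table_lines:
--         dynamic_schema_parts.extend(current_table_lines)
--     return "\n".join(dynamic_schema_parts) if dynamic_schema_parts else full_db_schema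
-- ===== SOURCE B (Python) =====
-- def _table_name(header):
--     return header.split("(", 1)[0].replace("CREATE TABLE", "").strip(' `"').lower()
--
-- def format_dynamic_schema_logic(relevant_table_names: list, full_db_schema: str) -> str:
--     # Two-pass decomposition: split the schema into per-table blocks first,
--     # then filter the blocks by table name.
--     if not relevant_table_names:
--         return "No specific table schema provided."
--     blocks = []
--     current = None
--     for line in full_db_schema.strip().split('\n'):
--         stripped = line.strip()
--         if "CREATE TABLE" in stripped.upper():
--             if current is not None:
--                 blocks.append(current)
--             current = [stripped]
--         elif current is not None:
--             current.append(stripped)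
--     if current is not None:
--         blocks.append(current)
--     wanted = {t.lower() for t in relevant_table_names}
--     kept = [line for block in blocks if _table_name(block[0]) in wanted
--             for line in block]
--     return "\n".join(kept) if kept else full_db_schema
-- ===== Notes on version B (the rewrite author's own statement) =====
-- stated objective: alternative
-- what changed: Replaces A's single-pass state machine (is_matching flag + current buffer + parts accumulator) by a two-pass decomposition: first split the schema into per-table blocks at CREATE TABLE headers, then filter whole blocks by table name and flatten.
import Mathlib
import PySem

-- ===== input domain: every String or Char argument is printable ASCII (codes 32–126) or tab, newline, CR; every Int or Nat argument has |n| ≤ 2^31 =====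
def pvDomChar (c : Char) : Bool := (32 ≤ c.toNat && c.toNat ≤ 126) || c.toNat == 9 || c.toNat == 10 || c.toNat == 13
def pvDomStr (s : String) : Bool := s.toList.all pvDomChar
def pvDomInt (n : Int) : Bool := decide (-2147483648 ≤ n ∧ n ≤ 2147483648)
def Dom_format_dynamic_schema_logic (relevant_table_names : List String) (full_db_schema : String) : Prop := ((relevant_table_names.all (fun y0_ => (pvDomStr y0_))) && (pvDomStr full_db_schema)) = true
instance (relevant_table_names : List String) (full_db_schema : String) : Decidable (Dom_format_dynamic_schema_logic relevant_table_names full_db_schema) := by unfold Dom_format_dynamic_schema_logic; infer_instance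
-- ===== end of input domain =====

-- B replaces A's one-pass flag/buffer state machine by a two-pass decomposition
-- (split into per-table blocks, then filter blocks by name); same cost, alternative structure.

-- shared helpers (identical snippets in both Pythons):
-- '"CREATE TABLE" in stripped_line.upper()'
def pvIsCreate (s : String) : Bool := PySem.Str.isIn "CREATE TABLE" (PySem.Str.upper s)
-- 'h.split("(", 1)[0].replace("CREATE TABLE", "").strip(' `"').lower()'
-- (splitMax? with sep "(" ≠ "" is always 'some' of a nonempty list, so getD/headD are exact)
def pvTableName (s : String) : String :=
  PySem.Str.lower (PySem.Str.stripChars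
    (PySem.Str.replace (((PySem.Str.splitMax? s "(" 1).getD []).headD "") "CREATE TABLE" "")
    " `\"")

-- ===== PORT A =====
-- A's loop body: state = (dynamic_schema_parts, current_table_lines, is_matching_table)
def pvAStep (low : List String) (st : List String × List String × Bool) (line : String) :
    List String × List String × Bool :=
  let s := PySem.Str.strip line
  if pvIsCreate s then
    let parts := if st.2.2 && !st.2.1.isEmpty then st.1 ++ st.2.1 else st.1
    if low.contains (pvTableName s) then (parts, [s], true) else (parts, [], false)
  else if st.2.2 then (st.1, st.2.1 ++ [s], st.2.2) else st

def format_dynamic_schema_logic (relevant_table_names : List String) (full_db_schema : String) : String :=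
  if relevant_table_names.isEmpty then "No specific table schema provided."
  else
    -- split('\n') with nonempty sep is always 'some'
    let schema_lines := (PySem.Str.split? (PySem.Str.strip full_db_schema) "\n").getD []
    let low := relevant_table_names.map PySem.Str.lower
    let st := schema_lines.foldl (pvAStep low) ([], [], false)
    let parts := if st.2.2 && !st.2.1.isEmpty then st.1 ++ st.2.1 else st.1
    if parts.isEmpty then full_db_schema else PySem.Str.join "\n" parts

-- ===== PORT B =====
-- pass 1: split the stripped lines into per-table blocks (none = before the first CREATE)
def pvBStep (st : List (List String) × Option (List String)) (line : String) :
    List (List String) × Option (List String) :=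
  let s := PySem.Str.strip line
  if pvIsCreate s then
    (match st.2 with | some b => st.1 ++ [b] | none => st.1, some [s])
  else
    match st.2 with
    | some b => (st.1, some (b ++ [s]))
    | none => st

def format_dynamic_schema_logic_alt (relevant_table_names : List String) (full_db_schema : String) : String :=
  if relevant_table_names.isEmpty then "No specific table schema provided."
  else
    let st := ((PySem.Str.split? (PySem.Str.strip full_db_schema) "\n").getD []).foldl pvBStep ([], none)
    let blocks := match st.2 with | some b => st.1 ++ [b] | none => st.1
    let wanted : PySem.Set String := PySem.Set.ofList (relevant_table_names.map PySem.Str.lower)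
    -- block[0]: every block starts with its CREATE line, so headD "" is exact
    let kept := (blocks.filter (fun b => PySem.Set.contains wanted (pvTableName (b.headD "")))).flatten
    if kept.isEmpty then full_db_schema else PySem.Str.join "\n" kept

-- ===== PRECONDITION & SPEC =====
def Spec_format_dynamic_schema_logic (relevant_table_names : List String) (full_db_schema : String) (out : String) : Prop := out = format_dynamic_schema_logic_alt relevant_table_names full_db_schema
instance (relevant_table_names : List String) (full_db_schema : String) (out : String) : Decidable (Spec_format_dynamic_schema_logic relevant_table_names full_db_schema out) := by unfold Spec_format_dynamic_schema_logic; infer_instance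

-- ===== CLAIM (what is proved, stated in full; the proofs are below) =====
def Claim_equal_format_dynamic_schema_logic : Prop := ∀ (relevant_table_names : List String) (full_db_schema : String), Dom_format_dynamic_schema_logic relevant_table_names full_db_schema → Spec_format_dynamic_schema_logic relevant_table_names full_db_schema (format_dynamic_schema_logic relevant_table_names full_db_schema)

-- ===== LEMMAS AND PROOFS =====

-- which blocks B keeps, phrased with A's list membership
def pvKeep (low : List String) (b : List String) : Bool := low.contains (pvTableName (b.headD ""))

lemma pvSetContains_eq (low : List String) (x : String) :
    PySem.Set.contains (PySem.Set.ofList low) x = low.contains x := by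
  have h1 := PySem.Set.contains_iff (PySem.Set.ofList low) x
  have h2 := PySem.Set.mem_ofList low x
  by_cases h : x ∈ low <;> simp_all

lemma pvHeadD_append (b s : List String) (h : b ≠ []) : (b ++ s).headD "" = b.headD "" := by
  cases b with
  | nil => exact absurd rfl h
  | cons x xs => rfl

-- unfolding lemmas for the two loop bodies
lemma pvAStep_create_pos (low : List String) (p c : List String) (f : Bool) (line : String)
    (h : pvIsCreate (PySem.Str.strip line) = true)
    (hk : low.contains (pvTableName (PySem.Str.strip line)) = true) :
    pvAStep low (p, c, f) line =
      ((if f && !c.isEmpty then p ++ c else p), [PySem.Str.strip line], true) := by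
  unfold pvAStep
  rw [if_pos h, if_pos hk]

lemma pvAStep_create_neg (low : List String) (p c : List String) (f : Bool) (line : String)
    (h : pvIsCreate (PySem.Str.strip line) = true)
    (hk : low.contains (pvTableName (PySem.Str.strip line)) = false) :
    pvAStep low (p, c, f) line =
      ((if f && !c.isEmpty then p ++ c else p), [], false) := by
  unfold pvAStep
  rw [if_pos h, if_neg (by rw [hk]; exact Bool.false_ne_true)]

lemma pvAStep_other (low : List String) (p c : List String) (f : Bool) (line : String)
    (h : pvIsCreate (PySem.Str.strip line) = false) :
    pvAStep low (p, c, f) line =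
      (if f then (p, c ++ [PySem.Str.strip line], f) else (p, c, f)) := by
  unfold pvAStep
  rw [if_neg (by rw [h]; exact Bool.false_ne_true)]

lemma pvBStep_create (bs : List (List String)) (cur : Option (List String)) (line : String)
    (h : pvIsCreate (PySem.Str.strip line) = true) :
    pvBStep (bs, cur) line =
      (match cur with | some b => bs ++ [b] | none => bs, some [PySem.Str.strip line]) := by
  unfold pvBStep
  rw [if_pos h]

lemma pvBStep_other (bs : List (List String)) (cur : Option (List String)) (line : String)
    (h : pvIsCreate (PySem.Str.strip line) = false) :
    pvBStep (bs, cur) line =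
      (match cur with | some b => (bs, some (b ++ [PySem.Str.strip line])) | none => (bs, cur)) := by
  unfold pvBStep
  rw [if_neg (by rw [h]; exact Bool.false_ne_true)]

-- the invariant tying A's loop state to B's loop state
def pvInv (low : List String) (p c : List String) (f : Bool)
    (bs : List (List String)) (cur : Option (List String)) : Prop :=
  match cur with
  | none => p = [] ∧ c = [] ∧ f = false ∧ bs = []
  | some b => f = pvKeep low b ∧ c = (if f then b else []) ∧ b ≠ [] ∧
      p = (bs.filter (pvKeep low)).flatten

-- A's final parts list / B's final kept list, as functions of the loop results
def pvAFinal (st : List String × List String × Bool) : List String :=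
  if st.2.2 && !st.2.1.isEmpty then st.1 ++ st.2.1 else st.1
def pvBFinal (low : List String) (st : List (List String) × Option (List String)) : List String :=
  ((match st.2 with | some b => st.1 ++ [b] | none => st.1).filter (pvKeep low)).flatten

-- A's "flush the current buffer" equals B's block accounting, under the invariant
lemma pvFlush_eq (low : List String) (p c : List String) (f : Bool)
    (bs : List (List String)) (b : List String)
    (hf : f = pvKeep low b) (hc : c = (if f then b else [])) (hb : b ≠ [])
    (hp : p = (bs.filter (pvKeep low)).flatten) :
    (if f && !c.isEmpty then p ++ c else p) = ((bs ++ [b]).filter (pvKeep low)).flatten := by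
  by_cases hk : pvKeep low b = true
  · have hf' : f = true := by rw [hf, hk]
    subst hc
    simp [hf', hb, hp, List.filter_append, hk]
  · have hk' : pvKeep low b = false := Bool.eq_false_iff.mpr hk
    have hf' : f = false := by rw [hf, hk']
    simp [hf', hp, List.filter_append, hk']

-- B's "append the open block" bookkeeping, as a function
def pvFlushBlocks (bs : List (List String)) (cur : Option (List String)) : List (List String) :=
  match cur with | some b => bs ++ [b] | none => bs

-- under the invariant, A's flush of the current buffer equals B's filtered blocks
lemma pvFlush_inv (low : List String) (p c : List String) (f : Bool)
    (bs : List (List String)) (cur : Option (List String)) (hinv : pvInv low p c f bs cur) :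
    (if f && !c.isEmpty then p ++ c else p) =
      ((pvFlushBlocks bs cur).filter (pvKeep low)).flatten := by
  unfold pvFlushBlocks
  cases cur with
  | none =>
    obtain ⟨hp, hc, hf, hbs⟩ := hinv
    subst hp; subst hc; subst hf; subst hbs
    rfl
  | some b =>
    obtain ⟨hf, hc, hb, hp⟩ := hinv
    exact pvFlush_eq low p c f bs b hf hc hb hp

lemma pvLoop_rel (low : List String) (lines : List String) :
    ∀ (p c : List String) (f : Bool) (bs : List (List String)) (cur : Option (List String)),
    pvInv low p c f bs cur →
    pvAFinal (lines.foldl (pvAStep low) (p, c, f)) =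
      pvBFinal low (lines.foldl pvBStep (bs, cur)) := by
  induction lines with
  | nil =>
    intro p c f bs cur hinv
    cases cur with
    | none =>
      obtain ⟨hp, hc, hf, hbs⟩ := hinv
      subst hp; subst hc; subst hf; subst hbs
      simp [pvAFinal, pvBFinal]
    | some b =>
      obtain ⟨hf, hc, hb, hp⟩ := hinv
      simp only [List.foldl_nil, pvAFinal, pvBFinal]
      exact pvFlush_eq low p c f bs b hf hc hb hp
  | cons line rest ih =>
    intro p c f bs cur hinv
    simp only [List.foldl_cons]
    by_cases hcr : pvIsCreate (PySem.Str.strip line) = true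
    · rw [pvBStep_create bs cur line hcr]
      have hflush := pvFlush_inv low p c f bs cur hinv
      by_cases hk : low.contains (pvTableName (PySem.Str.strip line)) = true
      · rw [pvAStep_create_pos low p c f line hcr hk]
        apply ih
        exact ⟨by unfold pvKeep; exact hk.symm, by simp, by simp, hflush⟩
      · have hk' : low.contains (pvTableName (PySem.Str.strip line)) = false :=
          Bool.eq_false_iff.mpr hk
        rw [pvAStep_create_neg low p c f line hcr hk']
        apply ih
        exact ⟨by unfold pvKeep; exact hk'.symm, by simp, by simp, hflush⟩
    · have hcr' : pvIsCreate (PySem.Str.strip line) = false := Bool.eq_false_iff.mpr hcr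
      rw [pvAStep_other low p c f line hcr', pvBStep_other bs cur line hcr']
      cases cur with
      | none =>
        obtain ⟨hp, hc, hf, hbs⟩ := hinv
        subst hp; subst hc; subst hf; subst hbs
        simp only [Bool.false_eq_true, if_false]
        exact ih [] [] false [] none ⟨rfl, rfl, rfl, rfl⟩
      | some b =>
        obtain ⟨hf, hc, hb, hp⟩ := hinv
        have hhead : pvKeep low (b ++ [PySem.Str.strip line]) = pvKeep low b := by
          unfold pvKeep
          rw [pvHeadD_append b _ hb]
        by_cases hk : pvKeep low b = true
        · have hf' : f = true := by rw [hf, hk]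
          subst hc
          rw [hf']
          simp only [if_true]
          apply ih
          exact ⟨by rw [hhead, hk], by simp, by simp, hp⟩
        · have hk' : pvKeep low b = false := Bool.eq_false_iff.mpr hk
          have hf' : f = false := by rw [hf, hk']
          rw [hf']
          simp only [Bool.false_eq_true, if_false]
          apply ih
          refine ⟨by rw [hhead, hk'], ?_, by simp, hp⟩
          rw [hf'] at hc
          simpa using hc

-- ===== VERDICT (by name: the statement is the Claim_ definition above) =====
theorem format_dynamic_schema_logic_spec : Claim_equal_format_dynamic_schema_logic := by
  intro rels schema _
  unfold Spec_format_dynamic_schema_logic format_dynamic_schema_logic format_dynamic_schema_logic_alt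
  by_cases hre : rels.isEmpty
  · simp [hre]
  · simp only [hre, Bool.false_eq_true, if_false]
    have hmain := pvLoop_rel (rels.map PySem.Str.lower)
      ((PySem.Str.split? (PySem.Str.strip schema) "\n").getD []) [] [] false [] none
      ⟨rfl, rfl, rfl, rfl⟩
    have hB : ∀ st : List (List String) × Option (List String),
        ((match st.2 with | some b => st.1 ++ [b] | none => st.1).filter
          (fun b => PySem.Set.contains (PySem.Set.ofList (rels.map PySem.Str.lower)) (pvTableName (b.headD "")))) =
        ((match st.2 with | some b => st.1 ++ [b] | none => st.1).filter (pvKeep (rels.map PySem.Str.lower))) := by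
      intro st
      apply List.filter_congr
      intro b _
      rw [pvSetContains_eq]
      rfl
    simp only [pvAFinal, pvBFinal] at hmain
    rw [hB]
    rw [hmain]
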